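-- pv_equiv track=rewrite | github.com/ceastld/alg | niuke/hj24.py | solve_chorus_formation
-- ===== SOURCE A (Python) =====
-- def solve_chorus_formation(n: int, heights: list[int]) -> int:
--     """
--     Solve the chorus formation problem with O(n log n) time complexity.
--
--     Args:
--         n: Number of students
--         heights: List of student heights
--
--     Returns:
--         Minimum number of students to remove
--     """
--     if n <= 2:
--         return 0
--
--     # Calculate longest increasing subsequence ending at each position using binary search
--     lis = [1] * n
--     tails = []  # tails[i] stores the smallest tail element of LIS of length i+1
--
--     for i in range(n):
--         # Binary search for the position to insert heights[i]
--         left, right = 0, len(tails)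
--         while left < right:
--             mid = (left + right) // 2
--             if tails[mid] < heights[i]:
--                 left = mid + 1
--             else:
--                 right = mid
--
--         # Update LIS length for position i
--         lis[i] = left + 1
--
--         # Update tails array
--         if left == len(tails):
--             tails.append(heights[i])
--         else:
--             tails[left] = heights[i]
--
--     # Calculate longest decreasing subsequence starting at each position
--     # We reverse the array and calculate LIS, then reverse the result
--     lds = [1] * n
--     tails = []
--
--     for i in range(n - 1, -1, -1):
--         # Binary search for the position to insert heights[i]
--         left, right = 0, len(tails)
--         while left < right:
--             mid = (left + right) // 2
--             if tails[mid] < heights[i]: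
--                 left = mid + 1
--             else:
--                 right = mid
--
--         # Update LDS length for position i
--         lds[i] = left + 1
--
--         # Update tails array
--         if left == len(tails):
--             tails.append(heights[i])
--         else:
--             tails[left] = heights[i]
--
--     # Find maximum chorus formation length
--     max_chorus = 0
--     for i in range(n):
--         # Chorus formation with i as the peak
--         chorus_length = lis[i] + lds[i] - 1
--         max_chorus = max(max_chorus, chorus_length)
--
--     return n - max_chorus
-- ===== SOURCE B (Python) =====
-- def _lis(hs):
--     """Length of the longest strictly increasing subsequence ending at each index (O(n^2) DP)."""
--     dp = []
--     for h in hs: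
--         best = 0
--         for x, d in zip(hs, dp):
--             if x < h:
--                 best = max(best, d)
--         dp.append(best + 1)
--     return dp
--
--
-- def solve_chorus_formation(n: int, heights: list[int]) -> int:
--     if n <= 2:
--         return 0
--     hs = heights[:n]
--     lis = _lis(hs)
--     lds = _lis(hs[::-1])[::-1]
--     best = 0
--     for a, b in zip(lis, lds):
--         best = max(best, a + b - 1)
--     return n - best
-- ===== Notes on version B (the rewrite author's own statement) =====
-- stated objective: simpler
-- what changed: Replaced the hand-written binary-search patience-sorting (tails arrays) LIS/LDS with the classic quadratic DP: lis[i]/lds[i] by a plain nested scan over earlier/later smaller heights.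
import Mathlib
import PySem

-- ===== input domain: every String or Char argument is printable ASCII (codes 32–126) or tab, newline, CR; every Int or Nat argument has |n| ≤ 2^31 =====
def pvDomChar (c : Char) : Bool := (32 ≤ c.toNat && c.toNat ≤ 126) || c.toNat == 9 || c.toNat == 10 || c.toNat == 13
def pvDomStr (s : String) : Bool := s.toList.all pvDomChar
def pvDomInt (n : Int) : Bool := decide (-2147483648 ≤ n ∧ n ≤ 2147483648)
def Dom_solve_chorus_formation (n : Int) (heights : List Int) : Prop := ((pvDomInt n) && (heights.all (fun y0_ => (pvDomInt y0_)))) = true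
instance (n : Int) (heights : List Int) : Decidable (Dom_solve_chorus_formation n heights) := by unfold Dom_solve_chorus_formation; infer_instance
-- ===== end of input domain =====

-- B replaces A's hand-written binary-search patience-sorting LIS/LDS with the classic quadratic
-- nested-scan DP; simpler code, same return value on every input where A returns (Pre_ excludes
-- the IndexError case 3 ≤ n with fewer than n heights).


-- ===== PORT A =====
-- A's hand-written while-loop is exactly bisect_left (same midpoint (left+right)//2, same
-- 'tails[mid] < x' test); it is ported as PySem.List.bisectLeft, which is that very loop.
def solve_chorus_formation (n : Int) (heights : List Int) : Int :=
  if n ≤ 2 then 0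
  else
    -- lis = [1] * n; tails = []; for i in range(n): …
    let st1 := (PySem.List.pyRange 0 n 1).foldl (fun (st : List Int × List Int) i =>
        let h := PySem.List.pyGetD heights i 0
        let left := PySem.List.bisectLeft st.2 h
        (PySem.List.pySetD st.1 i ((left : Int) + 1),
         if left = st.2.length then st.2 ++ [h] else st.2.set left h))
      (PySem.List.pyRepeat [1] n, [])
    -- lds = [1] * n; tails = []; for i in range(n - 1, -1, -1): …
    let st2 := (PySem.List.pyRange (n - 1) (-1) (-1)).foldl (fun (st : List Int × List Int) i =>
        let h := PySem.List.pyGetD heights i 0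
        let left := PySem.List.bisectLeft st.2 h
        (PySem.List.pySetD st.1 i ((left : Int) + 1),
         if left = st.2.length then st.2 ++ [h] else st.2.set left h))
      (PySem.List.pyRepeat [1] n, [])
    -- max_chorus = 0; for i in range(n): max_chorus = max(max_chorus, lis[i] + lds[i] - 1)
    n - (PySem.List.pyRange 0 n 1).foldl (fun mc i =>
        max mc (PySem.List.pyGetD st1.1 i 0 + PySem.List.pyGetD st2.1 i 0 - 1)) 0

-- ===== PORT B =====
-- _lis: dp = []; for h in hs: best = 0; for x, d in zip(hs, dp): if x < h: best = max(best, d); dp.append(best + 1)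
def pvLisDP (hs : List Int) : List Int :=
  hs.foldl (fun dp h =>
    dp ++ [(hs.zip dp).foldl (fun best xd => if xd.1 < h then max best xd.2 else best) 0 + 1]) []

def solve_chorus_formation_alt (n : Int) (heights : List Int) : Int :=
  if n ≤ 2 then 0
  else
    let hs := PySem.List.slice heights none (some n)          -- heights[:n]
    let lis := pvLisDP hs
    let lds := (pvLisDP hs.reverse).reverse                   -- hs[::-1] is reverse (PySem.List.slice?_none_none_neg_one)
    -- best = 0; for a, b in zip(lis, lds): best = max(best, a + b - 1)
    n - (lis.zip lds).foldl (fun best p => max best (p.1 + p.2 - 1)) 0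

-- ===== PRECONDITION & SPEC =====
-- Pre_ excludes exactly the inputs where A raises IndexError: 3 ≤ n but fewer than n heights.
def Pre_solve_chorus_formation (n : Int) (heights : List Int) : Prop :=
  n ≤ 2 ∨ n ≤ (heights.length : Int)
instance (n : Int) (heights : List Int) : Decidable (Pre_solve_chorus_formation n heights) := by
  unfold Pre_solve_chorus_formation; infer_instance

def pvWitness_solve_chorus_formation : Int × List Int := (4, [1, 3, 2, 1])

def Spec_solve_chorus_formation (n : Int) (heights : List Int) (out : Int) : Prop := out = solve_chorus_formation_alt n heights
instance (n : Int) (heights : List Int) (out : Int) : Decidable (Spec_solve_chorus_formation n heights out) := by unfold Spec_solve_chorus_formation; infer_instance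

-- ===== CLAIM (what is proved, stated in full; the proofs are below) =====
def Claim_equal_solve_chorus_formation : Prop := ∀ (n : Int) (heights : List Int), Dom_solve_chorus_formation n heights → Pre_solve_chorus_formation n heights → Spec_solve_chorus_formation n heights (solve_chorus_formation n heights)

-- ===== LEMMAS AND PROOFS =====

-- Functional model of one iteration of A's loops (lis values accumulated by appending).
def pvStep (st : List Int × List Int) (x : Int) : List Int × List Int :=
  let l := PySem.List.bisectLeft st.2 x
  (st.1 ++ [(l : Int) + 1], if l = st.2.length then st.2 ++ [x] else st.2.set l x)

def pvProc (hs : List Int) : List Int × List Int := hs.foldl pvStep ([], [])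

-- B's inner scan as a function (max over dp values of earlier strictly smaller elements).
def pvMx (p dp : List Int) (x : Int) : Int :=
  (p.zip dp).foldl (fun best xd => if xd.1 < x then max best xd.2 else best) 0

-- The tails invariant: tails is strictly increasing and, for every probe x, the number of
-- tails entries < x equals B's DP scan value over the processed prefix p.
def pvInv (p tails : List Int) : Prop :=
  tails.Pairwise (· < ·) ∧
  ∀ x : Int, ((tails.countP (fun t => decide (t < x)) : Nat) : Int) = pvMx p (pvLisDP p) x

-- helper: generic zip truncation
theorem pvZip_append_left {α β : Type} (l1 t : List α) (l2 : List β) (h : l2.length ≤ l1.length) :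
    (l1 ++ t).zip l2 = l1.zip l2 := by
  induction l1 generalizing l2 with
  | nil => cases l2 with
    | nil => simp
    | cons b bs => simp at h
  | cons a as ih => cases l2 with
    | nil => simp
    | cons b bs =>
      simp only [List.cons_append, List.zip_cons_cons]
      simp only [List.length_cons] at h
      rw [ih bs (by omega)]

theorem pvFoldAppend_len {α : Type} (g : List Int → α → Int) :
    ∀ (l : List α) (acc : List Int),
      (l.foldl (fun dp h => dp ++ [g dp h]) acc).length = acc.length + l.length := by
  intro l
  induction l with
  | nil => simp
  | cons h t ih =>
    intro acc
    rw [List.foldl_cons, ih]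
    simp
    omega

theorem pvLisDP_length (hs : List Int) : (pvLisDP hs).length = hs.length := by
  unfold pvLisDP
  rw [pvFoldAppend_len (g := fun dp h =>
    (hs.zip dp).foldl (fun best xd => if xd.1 < h then max best xd.2 else best) 0 + 1)]
  simp

theorem pvFold_ext (hs t : List Int) :
    ∀ (l acc : List Int), acc.length + l.length ≤ hs.length →
      l.foldl (fun dp h => dp ++
          [((hs ++ t).zip dp).foldl (fun best xd => if xd.1 < h then max best xd.2 else best) 0 + 1]) acc
      = l.foldl (fun dp h => dp ++
          [(hs.zip dp).foldl (fun best xd => if xd.1 < h then max best xd.2 else best) 0 + 1]) acc := by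
  intro l
  induction l with
  | nil => intro acc _; rfl
  | cons h l ih =>
    intro acc hlen
    simp only [List.length_cons] at hlen
    rw [List.foldl_cons, List.foldl_cons, pvZip_append_left hs t acc (by omega)]
    exact ih _ (by simp; omega)

theorem pvLisDP_append (p : List Int) (x : Int) :
    pvLisDP (p ++ [x]) = pvLisDP p ++ [pvMx p (pvLisDP p) x + 1] := by
  unfold pvLisDP pvMx
  rw [List.foldl_append]
  rw [pvFold_ext p [x] p [] (by simp)]
  rw [List.foldl_cons, List.foldl_nil]
  rw [pvZip_append_left p [x] _ (by
    rw [show (List.foldl (fun dp h => dp ++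
      [(p.zip dp).foldl (fun best xd => if xd.1 < h then max best xd.2 else best) 0 + 1]) [] p) = pvLisDP p from rfl,
      pvLisDP_length])]

theorem pvCountP_of_prefix (tails : List Int) (x : Int) (r : Nat) (hr : r ≤ tails.length)
    (h1 : ∀ (j : Nat) (hj : j < tails.length), j < r → tails[j] < x)
    (h2 : ∀ (j : Nat) (hj : j < tails.length), r ≤ j → x ≤ tails[j]) :
    tails.countP (fun t => decide (t < x)) = r := by
  have hsplit := List.take_append_drop r tails
  calc tails.countP (fun t => decide (t < x))
      = ((tails.take r) ++ (tails.drop r)).countP (fun t => decide (t < x)) := by rw [hsplit]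
    _ = (tails.take r).countP (fun t => decide (t < x))
        + (tails.drop r).countP (fun t => decide (t < x)) := List.countP_append
    _ = r + 0 := by
        congr 1
        · have hall : ∀ a ∈ tails.take r, (fun t => decide (t < x)) a = true := by
            intro a ha
            obtain ⟨i, hi, rfl⟩ := List.mem_iff_getElem.mp ha
            have hi' : i < r := by simp [List.length_take] at hi; omega
            rw [List.getElem_take]
            simpa using h1 i (by omega) hi'
          rw [List.countP_eq_length.mpr hall, List.length_take]
          omega
        · rw [List.countP_eq_zero]
          intro a ha
          obtain ⟨i, hi, rfl⟩ := List.mem_iff_getElem.mp ha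
          rw [List.getElem_drop]
          have := h2 (r + i) (by simp at hi; omega) (by omega)
          simpa using not_lt.mpr this
    _ = r := by omega

theorem pvBisect_eq_countP (tails : List Int) (x : Int) (h : tails.Pairwise (· ≤ ·)) :
    PySem.List.bisectLeft tails x = tails.countP (fun t => decide (t < x)) := by
  obtain ⟨hle, h1, h2⟩ := PySem.List.bisectLeft_spec tails x h
  exact (pvCountP_of_prefix tails x _ hle h1 h2).symm

theorem pvInv_step (p tails : List Int) (x : Int) (h : pvInv p tails) :
    pvInv (p ++ [x])
      (if PySem.List.bisectLeft tails x = tails.length then tails ++ [x]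
       else tails.set (PySem.List.bisectLeft tails x) x) := by
  unfold pvInv at h ⊢
  obtain ⟨hsorted, hcnt⟩ := h
  have hsle : tails.Pairwise (· ≤ ·) := hsorted.imp (fun h => le_of_lt h)
  obtain ⟨hle, h1, h2⟩ := PySem.List.bisectLeft_spec tails x hsle
  have hbc : PySem.List.bisectLeft tails x = tails.countP (fun t => decide (t < x)) :=
    pvBisect_eq_countP tails x hsle
  set l := PySem.List.bisectLeft tails x with hldef
  have hMx' : ∀ y : Int, pvMx (p ++ [x]) (pvLisDP (p ++ [x])) y
      = if x < y then max (pvMx p (pvLisDP p) y) (pvMx p (pvLisDP p) x + 1)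
        else pvMx p (pvLisDP p) y := by
    intro y
    rw [pvLisDP_append]
    unfold pvMx
    rw [List.zip_append (by rw [pvLisDP_length]), List.foldl_append]
    simp only [List.zip_cons_cons, List.zip_nil_right, List.foldl_cons, List.foldl_nil]
  have hmono : ∀ (i j : Nat) (hi : i < tails.length) (hj : j < tails.length), i < j →
      tails[i] < tails[j] := List.pairwise_iff_getElem.mp hsorted
  by_cases hcase : l = tails.length
  · rw [if_pos hcase]
    constructor
    · rw [List.pairwise_append]
      refine ⟨hsorted, List.pairwise_singleton _ _, ?_⟩
      intro a ha b hb
      simp only [List.mem_singleton] at hb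
      subst hb
      obtain ⟨i, hi, rfl⟩ := List.mem_iff_getElem.mp ha
      exact h1 i hi (by omega)
    · intro y
      rw [hMx' y, ← hcnt y, ← hcnt x, List.countP_append]
      by_cases hxy : x < y
      · rw [if_pos hxy]
        have hally : tails.countP (fun t => decide (t < y)) = tails.length := by
          rw [List.countP_eq_length]
          intro a ha
          obtain ⟨i, hi, rfl⟩ := List.mem_iff_getElem.mp ha
          have := h1 i hi (by omega)
          simp
          omega
        have hallx : tails.countP (fun t => decide (t < x)) = tails.length := by omega
        simp only [List.countP_cons, List.countP_nil]
        rw [hally, hallx]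
        simp [hxy]
      · rw [if_neg hxy]
        simp only [List.countP_cons, List.countP_nil]
        simp [hxy]
  · rw [if_neg hcase]
    have hllen : l < tails.length := lt_of_le_of_ne hle hcase
    have hxl : x ≤ tails[l] := h2 l hllen le_rfl
    constructor
    · rw [List.pairwise_iff_getElem]
      intro i j hi hj hij
      simp only [List.length_set] at hi hj
      rw [List.getElem_set, List.getElem_set]
      split_ifs with hi' hj' hj'
      · omega
      · exact lt_of_le_of_lt hxl (hmono l j hllen hj (by omega))
      · exact h1 i hi (by omega)
      · exact hmono i j hi hj hij
    · intro y
      rw [hMx' y, ← hcnt y, ← hcnt x]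
      have hset : tails.set l x = tails.take l ++ x :: tails.drop (l + 1) := by
        rw [List.set_eq_take_append_cons_drop, if_pos hllen]
      have hdecomp : tails.take l ++ tails[l] :: tails.drop (l + 1) = tails := by
        rw [List.getElem_cons_drop, List.take_append_drop]
      have htake : ∀ a ∈ tails.take l, a < x := by
        intro a ha
        obtain ⟨i, hi, rfl⟩ := List.mem_iff_getElem.mp ha
        have hi' : i < l := by simp [List.length_take] at hi; omega
        rw [List.getElem_take]
        exact h1 i (by omega) hi'
      have hcx : tails.countP (fun t => decide (t < x)) = l := hbc.symm
      have hcy : tails.countP (fun t => decide (t < y))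
          = (tails.take l).countP (fun t => decide (t < y))
            + (if tails[l] < y then 1 else 0)
            + (tails.drop (l + 1)).countP (fun t => decide (t < y)) := by
        conv_lhs => rw [← hdecomp]
        rw [List.countP_append, List.countP_cons]
        simp only [decide_eq_true_eq]
        omega
      have hcy' : (tails.set l x).countP (fun t => decide (t < y))
          = (tails.take l).countP (fun t => decide (t < y))
            + (if x < y then 1 else 0)
            + (tails.drop (l + 1)).countP (fun t => decide (t < y)) := by
        rw [hset, List.countP_append, List.countP_cons]
        simp only [decide_eq_true_eq]
        omega
      by_cases hxy : x < y
      · rw [if_pos hxy]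
        have hAy : (tails.take l).countP (fun t => decide (t < y)) = (tails.take l).length := by
          rw [List.countP_eq_length]
          intro a ha
          have := htake a ha
          simp
          omega
        have hlenA : (tails.take l).length = l := by simp [List.length_take]; omega
        by_cases hty : tails[l] < y
        · have hge : l + 1 ≤ tails.countP (fun t => decide (t < y)) := by
            rw [hcy, hAy, hlenA, if_pos hty]
            omega
          rw [max_eq_left (by omega)]
          rw [hcy', hcy, if_pos hty]
          push_cast
          omega
        · have hD : (tails.drop (l + 1)).countP (fun t => decide (t < y)) = 0 := by
            rw [List.countP_eq_zero]
            intro a ha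
            obtain ⟨i, hi, rfl⟩ := List.mem_iff_getElem.mp ha
            rw [List.getElem_drop]
            have hi' : l + 1 + i < tails.length := by rw [List.length_drop] at hi; omega
            have hgt := hmono l (l + 1 + i) hllen hi' (by omega)
            simp
            omega
          have hcyv : tails.countP (fun t => decide (t < y)) = l := by
            rw [hcy, hAy, hlenA, if_neg hty, hD]
            omega
          rw [max_eq_right (by rw [hcx, hcyv]; omega)]
          rw [hcy', hAy, hlenA, if_pos hxy, hD, hcx]
          push_cast
          omega
      · rw [if_neg hxy]
        have hty : ¬ tails[l] < y := by omega
        rw [hcy', hcy, if_neg hty, if_neg hxy]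

theorem pvProc_spec (hs : List Int) :
    (pvProc hs).1 = pvLisDP hs ∧ pvInv hs (pvProc hs).2 := by
  induction hs using List.reverseRecOn with
  | nil =>
    refine ⟨rfl, ?_⟩
    unfold pvInv
    refine ⟨List.Pairwise.nil, ?_⟩
    intro x
    simp [pvProc, pvMx, pvLisDP]
  | append_singleton p x ih =>
    have ih1 := ih.1
    have ih2 := ih.2
    unfold pvInv at ih2
    obtain ⟨ihsort, ihcnt⟩ := ih2
    have hfold : pvProc (p ++ [x]) = pvStep (pvProc p) x := by
      unfold pvProc
      rw [List.foldl_append, List.foldl_cons, List.foldl_nil]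
    have hsle : (pvProc p).2.Pairwise (· ≤ ·) := ihsort.imp (fun h => le_of_lt h)
    have hb : ((PySem.List.bisectLeft (pvProc p).2 x : Nat) : Int) = pvMx p (pvLisDP p) x := by
      rw [pvBisect_eq_countP _ _ hsle]
      exact ihcnt x
    constructor
    · rw [hfold]
      show (pvProc p).1 ++ [((PySem.List.bisectLeft (pvProc p).2 x : Nat) : Int) + 1]
          = pvLisDP (p ++ [x])
      rw [pvLisDP_append, ih1, hb]
    · rw [hfold]
      exact pvInv_step p (pvProc p).2 x (by unfold pvInv; exact ⟨ihsort, ihcnt⟩)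

theorem pvProc_fst_length (hs : List Int) : ((pvProc hs).1).length = hs.length := by
  rw [(pvProc_spec hs).1, pvLisDP_length]

theorem pvLoop1 (heights : List Int) (m : Nat) (hm : m ≤ heights.length) :
    ∀ (j k : Nat), k + j = m →
      (PySem.List.pyRange (k : Int) (m : Int) 1).foldl
        (fun (st : List Int × List Int) i =>
          (PySem.List.pySetD st.1 i ((PySem.List.bisectLeft st.2 (PySem.List.pyGetD heights i 0) : Int) + 1),
           if PySem.List.bisectLeft st.2 (PySem.List.pyGetD heights i 0) = st.2.length
           then st.2 ++ [PySem.List.pyGetD heights i 0]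
           else st.2.set (PySem.List.bisectLeft st.2 (PySem.List.pyGetD heights i 0)) (PySem.List.pyGetD heights i 0)))
        ((pvProc ((heights.take m).take k)).1 ++ List.replicate (m - k) 1,
         (pvProc ((heights.take m).take k)).2)
      = pvProc (heights.take m) := by
  intro j
  induction j with
  | zero =>
    intro k hk
    have hkm : k = m := by omega
    subst hkm
    rw [PySem.List.pyRange_one_eq_nil (le_refl _), List.foldl_nil]
    rw [List.take_of_length_le (l := heights.take k) (by simp [List.length_take])]
    simp
  | succ j ih =>
    intro k hk
    have hkm : k < m := by omega
    have hlenhs : (heights.take m).length = m := by simp [List.length_take]; omega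
    have hb1 : k < (heights.take m).length := by omega
    rw [PySem.List.pyRange_one_cons (by exact_mod_cast hkm), List.foldl_cons]
    have hget : PySem.List.pyGetD heights (k : Int) 0 = (heights.take m)[k] := by
      rw [PySem.List.pyGetD_natCast, List.getD_eq_getElem heights 0 (show k < heights.length by omega)]
      exact (List.getElem_take (h := hb1)).symm
    have htk : (heights.take m).take (k + 1) = (heights.take m).take k ++ [(heights.take m)[k]] := by
      rw [List.take_add_one, List.getElem?_eq_getElem hb1]
      rfl
    have hproc : pvProc ((heights.take m).take (k + 1))
        = pvStep (pvProc ((heights.take m).take k)) ((heights.take m)[k]) := by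
      rw [htk]
      unfold pvProc
      rw [List.foldl_append, List.foldl_cons, List.foldl_nil]
    have hVlen : ((pvProc ((heights.take m).take k)).1).length = k := by
      rw [pvProc_fst_length, List.length_take, hlenhs]
      omega
    rw [hget]
    have hSet : PySem.List.pySetD
        ((pvProc ((heights.take m).take k)).1 ++ List.replicate (m - k) 1) (k : Int)
        ((PySem.List.bisectLeft (pvProc ((heights.take m).take k)).2 ((heights.take m)[k]) : Int) + 1)
        = (pvProc ((heights.take m).take (k + 1))).1 ++ List.replicate (m - (k + 1)) 1 := by
      rw [hproc]
      show _ = ((pvProc ((heights.take m).take k)).1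
          ++ [(PySem.List.bisectLeft (pvProc ((heights.take m).take k)).2 ((heights.take m)[k]) : Int) + 1])
          ++ List.replicate (m - (k + 1)) 1
      rw [PySem.List.pySetD_natCast, show m - k = (m - (k + 1)) + 1 from by omega, List.replicate_succ,
        List.set_append, if_neg (by rw [hVlen]; omega), hVlen, Nat.sub_self, List.set_cons_zero,
        List.append_cons]
    have hTail : (if PySem.List.bisectLeft (pvProc ((heights.take m).take k)).2 ((heights.take m)[k])
            = (pvProc ((heights.take m).take k)).2.length
          then (pvProc ((heights.take m).take k)).2 ++ [(heights.take m)[k]]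
          else (pvProc ((heights.take m).take k)).2.set
            (PySem.List.bisectLeft (pvProc ((heights.take m).take k)).2 ((heights.take m)[k]))
            ((heights.take m)[k]))
        = (pvProc ((heights.take m).take (k + 1))).2 := by
      rw [hproc]
      rfl
    rw [hSet, hTail, show ((k : Int) + 1) = ((k + 1 : Nat) : Int) from by omega]
    exact ih (k + 1) (by omega)

theorem pvLoop2 (heights : List Int) (m : Nat) (hm : m ≤ heights.length) :
    ∀ (k : Nat), k ≤ m →
      (PySem.List.pyRange ((k : Int) - 1) (-1) (-1)).foldl
        (fun (st : List Int × List Int) i =>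
          (PySem.List.pySetD st.1 i ((PySem.List.bisectLeft st.2 (PySem.List.pyGetD heights i 0) : Int) + 1),
           if PySem.List.bisectLeft st.2 (PySem.List.pyGetD heights i 0) = st.2.length
           then st.2 ++ [PySem.List.pyGetD heights i 0]
           else st.2.set (PySem.List.bisectLeft st.2 (PySem.List.pyGetD heights i 0)) (PySem.List.pyGetD heights i 0)))
        (List.replicate k 1 ++ ((pvProc (((heights.take m).drop k).reverse)).1).reverse,
         (pvProc (((heights.take m).drop k).reverse)).2)
      = (((pvProc ((heights.take m).reverse)).1).reverse, (pvProc ((heights.take m).reverse)).2) := by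
  intro k
  induction k with
  | zero =>
    intro _
    rw [show ((0 : Nat) : Int) - 1 = -1 from by norm_num,
      PySem.List.pyRange_neg_one_eq_nil (le_refl _), List.foldl_nil]
    simp
  | succ k ih =>
    intro hk1
    have hkm : k < m := by omega
    have hlenhs : (heights.take m).length = m := by simp [List.length_take]; omega
    have hb1 : k < (heights.take m).length := by omega
    have hcast : ((k + 1 : Nat) : Int) - 1 = (k : Int) := by omega
    rw [hcast, PySem.List.pyRange_neg_one_cons
      (show (-1 : Int) < (k : Int) by have : (0 : Int) ≤ (k : Int) := Int.natCast_nonneg k; omega),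
      List.foldl_cons]
    have hget : PySem.List.pyGetD heights (k : Int) 0 = (heights.take m)[k] := by
      rw [PySem.List.pyGetD_natCast, List.getD_eq_getElem heights 0 (show k < heights.length by omega)]
      exact (List.getElem_take (h := hb1)).symm
    have hrev : ((heights.take m).drop k).reverse
        = ((heights.take m).drop (k + 1)).reverse ++ [(heights.take m)[k]] := by
      rw [← List.getElem_cons_drop hb1, List.reverse_cons]
    have hproc : pvProc (((heights.take m).drop k).reverse)
        = pvStep (pvProc (((heights.take m).drop (k + 1)).reverse)) ((heights.take m)[k]) := by
      rw [hrev]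
      unfold pvProc
      rw [List.foldl_append, List.foldl_cons, List.foldl_nil]
    rw [hget]
    have hSet : PySem.List.pySetD
        (List.replicate (k + 1) 1 ++ ((pvProc (((heights.take m).drop (k + 1)).reverse)).1).reverse) (k : Int)
        ((PySem.List.bisectLeft (pvProc (((heights.take m).drop (k + 1)).reverse)).2 ((heights.take m)[k]) : Int) + 1)
        = List.replicate k 1 ++ ((pvProc (((heights.take m).drop k).reverse)).1).reverse := by
      rw [hproc]
      show _ = List.replicate k 1
          ++ (((pvProc (((heights.take m).drop (k + 1)).reverse)).1
              ++ [(PySem.List.bisectLeft (pvProc (((heights.take m).drop (k + 1)).reverse)).2 ((heights.take m)[k]) : Int) + 1]).reverse)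
      rw [List.reverse_append, List.reverse_singleton, List.singleton_append,
        PySem.List.pySetD_natCast, List.replicate_succ', List.append_assoc, List.singleton_append,
        List.set_append, if_neg (by simp), List.length_replicate, Nat.sub_self, List.set_cons_zero]
    have hTail : (if PySem.List.bisectLeft (pvProc (((heights.take m).drop (k + 1)).reverse)).2 ((heights.take m)[k])
            = (pvProc (((heights.take m).drop (k + 1)).reverse)).2.length
          then (pvProc (((heights.take m).drop (k + 1)).reverse)).2 ++ [(heights.take m)[k]]
          else (pvProc (((heights.take m).drop (k + 1)).reverse)).2.set
            (PySem.List.bisectLeft (pvProc (((heights.take m).drop (k + 1)).reverse)).2 ((heights.take m)[k]))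
            ((heights.take m)[k]))
        = (pvProc (((heights.take m).drop k).reverse)).2 := by
      rw [hproc]
      rfl
    rw [hSet, hTail]
    exact ih (by omega)

theorem pvLoop3 : ∀ (as bs : List Int), as.length = bs.length → ∀ acc : Int,
    (PySem.List.pyRange 0 (as.length : Int) 1).foldl
      (fun mc i => max mc (PySem.List.pyGetD as i 0 + PySem.List.pyGetD bs i 0 - 1)) acc
    = (as.zip bs).foldl (fun best p => max best (p.1 + p.2 - 1)) acc := by
  intro as
  induction as using List.reverseRecOn with
  | nil =>
    intro bs hlen acc
    have hbs : bs = [] := by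
      cases bs with
      | nil => rfl
      | cons c cs => simp at hlen
    subst hbs
    rw [show ((List.length ([] : List Int) : Nat) : Int) = 0 from by simp,
      PySem.List.pyRange_one_eq_nil (le_refl _)]
    rfl
  | append_singleton as a ih =>
    intro bs hlen acc
    rcases List.eq_nil_or_concat bs with rfl | ⟨bs', b, rfl⟩
    · simp at hlen
    · rw [List.concat_eq_append] at hlen ⊢
      have hlen' : as.length = bs'.length := by simp at hlen; omega
      have hlen1 : (((as ++ [a]).length : Nat) : Int) = (as.length : Int) + 1 := by simp
      rw [hlen1, PySem.List.pyRange_one_succ_right (by positivity), List.foldl_append,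
        List.foldl_cons, List.foldl_nil]
      have hcong : (PySem.List.pyRange 0 ((as.length : Nat) : Int) 1).foldl
          (fun mc i => max mc (PySem.List.pyGetD (as ++ [a]) i 0 + PySem.List.pyGetD (bs' ++ [b]) i 0 - 1)) acc
          = (PySem.List.pyRange 0 ((as.length : Nat) : Int) 1).foldl
          (fun mc i => max mc (PySem.List.pyGetD as i 0 + PySem.List.pyGetD bs' i 0 - 1)) acc := by
        apply PySem.List.foldl_congr_mem
        intro acc' i hi
        obtain ⟨h0i, hiu⟩ := (PySem.List.mem_pyRange_one).mp hi
        have hita : i.toNat < as.length := by omega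
        have hitb : i.toNat < bs'.length := by omega
        rw [PySem.List.pyGetD_eq_getElem _ _ h0i (by simp; omega),
          PySem.List.pyGetD_eq_getElem _ _ h0i (by simp; omega),
          PySem.List.pyGetD_eq_getElem _ _ h0i (by exact_mod_cast hiu),
          PySem.List.pyGetD_eq_getElem _ _ h0i (by rw [← hlen']; exact_mod_cast hiu),
          List.getElem_append_left hita, List.getElem_append_left hitb]
      rw [hcong]
      have elast1 : PySem.List.pyGetD (as ++ [a]) ((as.length : Nat) : Int) 0 = a := by
        rw [PySem.List.pyGetD_natCast, List.getD_eq_getElem _ _ (by simp)]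
        simp
      have elast2 : PySem.List.pyGetD (bs' ++ [b]) ((as.length : Nat) : Int) 0 = b := by
        rw [hlen', PySem.List.pyGetD_natCast, List.getD_eq_getElem _ _ (by simp)]
        simp
      rw [elast1, elast2, List.zip_append hlen', List.foldl_append, ih bs' hlen' acc]
      rfl

-- ===== VERDICT (by name: the statement is the Claim_ definition above) =====
theorem solve_chorus_formation_spec : Claim_equal_solve_chorus_formation := by
  unfold Claim_equal_solve_chorus_formation
  intro n heights _dom hpre
  unfold Spec_solve_chorus_formation
  by_cases hn : n ≤ 2
  · unfold solve_chorus_formation solve_chorus_formation_alt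
    rw [if_pos hn, if_pos hn]
  · have hlen : n ≤ (heights.length : Int) := by
      rcases hpre with h | h
      · omega
      · exact h
    have h0 : (0 : Int) ≤ n := by omega
    have hm : n.toNat ≤ heights.length := by omega
    have hmn : ((n.toNat : Nat) : Int) = n := Int.toNat_of_nonneg h0
    simp only [solve_chorus_formation, solve_chorus_formation_alt, if_neg hn]
    have e1 : (PySem.List.pyRange 0 n 1).foldl
        (fun (st : List Int × List Int) i =>
          (PySem.List.pySetD st.1 i ((PySem.List.bisectLeft st.2 (PySem.List.pyGetD heights i 0) : Int) + 1),
           if PySem.List.bisectLeft st.2 (PySem.List.pyGetD heights i 0) = st.2.length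
           then st.2 ++ [PySem.List.pyGetD heights i 0]
           else st.2.set (PySem.List.bisectLeft st.2 (PySem.List.pyGetD heights i 0)) (PySem.List.pyGetD heights i 0)))
        (PySem.List.pyRepeat [1] n, ([] : List Int))
        = pvProc (heights.take n.toNat) := by
      rw [PySem.List.pyRepeat_singleton]
      have h := pvLoop1 heights n.toNat hm n.toNat 0 (by omega)
      rw [hmn] at h
      simpa [pvProc] using h
    have e2 : (PySem.List.pyRange (n - 1) (-1) (-1)).foldl
        (fun (st : List Int × List Int) i =>
          (PySem.List.pySetD st.1 i ((PySem.List.bisectLeft st.2 (PySem.List.pyGetD heights i 0) : Int) + 1),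
           if PySem.List.bisectLeft st.2 (PySem.List.pyGetD heights i 0) = st.2.length
           then st.2 ++ [PySem.List.pyGetD heights i 0]
           else st.2.set (PySem.List.bisectLeft st.2 (PySem.List.pyGetD heights i 0)) (PySem.List.pyGetD heights i 0)))
        (PySem.List.pyRepeat [1] n, ([] : List Int))
        = (((pvProc ((heights.take n.toNat).reverse)).1).reverse,
           (pvProc ((heights.take n.toNat).reverse)).2) := by
      rw [PySem.List.pyRepeat_singleton]
      have h := pvLoop2 heights n.toNat hm n.toNat (le_refl _)
      rw [hmn] at h
      have hd : (heights.take n.toNat).drop n.toNat = [] := by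
        apply List.drop_eq_nil_of_le
        simp [List.length_take]
      rw [hd] at h
      simpa [pvProc] using h
    have e1a := congrArg Prod.fst e1
    have e2a := congrArg Prod.fst e2
    simp only [(pvProc_spec (heights.take n.toNat)).1,
      (pvProc_spec ((heights.take n.toNat).reverse)).1] at e1a e2a
    rw [e1a, e2a, PySem.List.slice_to heights h0]
    have hlenz : (pvLisDP (heights.take n.toNat)).length
        = ((pvLisDP ((heights.take n.toNat).reverse)).reverse).length := by
      simp [pvLisDP_length]
    have hb : n = ((pvLisDP (heights.take n.toNat)).length : Int) := by
      rw [pvLisDP_length]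
      simp [List.length_take]
      omega
    have h3 := pvLoop3 (pvLisDP (heights.take n.toNat))
      ((pvLisDP ((heights.take n.toNat).reverse)).reverse) hlenz 0
    rw [← hb] at h3
    rw [h3]
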